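-- pv_equiv track=rewrite | github.com/LiamWoodRoberts/mimic_III_nlp_notebooks | pre_annotate.py | create_seqs
-- ===== SOURCE A (Python) =====
-- def create_seqs(word_ents):
--     seqs = []
--     seq = []
--     for ents in word_ents:
--         if len(ents)>1:
--             if len(ents[0])>0:
--                 if ents[0][-1] == ".":
--                     seq.append([ents[0][:-1],ents[1]])
--                 if len(ents[0])>1:
--                     seq.append([ents[0].replace(",",""),ents[1]])
--                 else:
--                     seq.append(ents)
--         else:
--             seqs.append([i for i in seq if len(i[0])>0])
--             seq=[]
--     return seqs
-- ===== SOURCE B (Python) =====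
-- def create_seqs(word_ents):
--     # Index-based reformulation: collect the positions of the separators
--     # (entries with fewer than 2 fields), then emit one sequence per separator
--     # from the slice between consecutive separators; the tail after the last
--     # separator yields no sequence.  normalize() produces, per entry, exactly
--     # the surviving (nonempty-word) normalized pairs, so no later filter pass.
--     seps = [i for i, e in enumerate(word_ents) if len(e) <= 1]
--     bounds = zip([-1] + seps, seps)
--     return [[x for e in word_ents[a + 1:b] for x in normalize(e)] for a, b in bounds]
--
-- def normalize(e):
--     w = e[0]
--     out = []
--     if w.endswith(".") and len(w) > 1:
--         out.append([w[:-1], e[1]])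
--     r = w.replace(",", "")
--     if len(w) > 1 and len(r) > 0:
--         out.append([r, e[1]])
--     elif len(w) == 1:
--         out.append(e)
--     return out
-- ===== Notes on version B (the rewrite author's own statement) =====
-- stated objective: alternative
-- what changed: A's single stateful loop with a running seq buffer flushed at separators is replaced by an index-based formulation: compute the separator positions with enumerate, pair consecutive positions, and build each output sequence directly from the slice between them via normalize(), which fuses A's flush-time empty-word filter into the per-entry expansion so no accumulator and no filter pass exist.
import Mathlib
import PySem

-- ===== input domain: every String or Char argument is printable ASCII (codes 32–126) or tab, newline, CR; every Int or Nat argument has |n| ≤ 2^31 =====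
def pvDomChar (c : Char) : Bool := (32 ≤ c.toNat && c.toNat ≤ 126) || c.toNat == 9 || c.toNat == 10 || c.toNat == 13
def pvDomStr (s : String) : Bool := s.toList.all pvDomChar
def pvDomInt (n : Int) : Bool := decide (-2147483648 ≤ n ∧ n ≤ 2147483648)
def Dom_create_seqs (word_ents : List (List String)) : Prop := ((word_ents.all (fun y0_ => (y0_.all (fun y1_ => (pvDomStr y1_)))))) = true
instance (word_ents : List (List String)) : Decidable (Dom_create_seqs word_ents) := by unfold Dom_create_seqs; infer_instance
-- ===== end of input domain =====

-- B replaces A's stateful accumulate-and-flush loop by an index-based formulation over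
-- separator positions, with the empty-word filter fused into per-entry normalization
-- (objective: alternative decomposition; same cost).

-- ===== PORT A =====
-- one iteration of A's for-loop over state (seqs, seq)
def pvStepA (st : List (List (List String)) × List (List String)) (ents : List String) :
    List (List (List String)) × List (List String) :=
  if 1 < ents.length then
    let e0 := PySem.List.pyGetD ents 0 ""   -- ents[0]; in range under the length guard
    let e1 := PySem.List.pyGetD ents 1 ""   -- ents[1]
    if 0 < PySem.Str.len e0 then
      let seq1 := if PySem.Str.pyGet? e0 (-1) = some '.'
        then st.2 ++ [[PySem.Str.slice e0 none (some (-1)), e1]] else st.2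
      let seq2 := if 1 < PySem.Str.len e0
        then seq1 ++ [[PySem.Str.replace e0 "," "", e1]]
        else seq1 ++ [ents]
      (st.1, seq2)
    else st
  else
    (st.1 ++ [st.2.filter (fun i => 0 < PySem.Str.len (PySem.List.pyGetD i 0 ""))],
     ([] : List (List String)))

def create_seqs (word_ents : List (List String)) : List (List (List String)) :=
  (word_ents.foldl pvStepA ([], [])).1

-- ===== PORT B =====
-- normalize(e) from Source B
def pvNormalize (e : List String) : List (List String) :=
  let w := PySem.List.pyGetD e 0 ""
  (if PySem.Str.endswith w "." = true ∧ 1 < PySem.Str.len w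
     then [[PySem.Str.slice w none (some (-1)), PySem.List.pyGetD e 1 ""]] else []) ++
  (let r := PySem.Str.replace w "," ""
   if 1 < PySem.Str.len w ∧ 0 < PySem.Str.len r
     then [[r, PySem.List.pyGetD e 1 ""]]
   else if PySem.Str.len w = 1 then [e] else [])

def create_seqs_alt (word_ents : List (List String)) : List (List (List String)) :=
  let seps : List Int :=
    ((PySem.List.enumerate word_ents).filter (fun p => decide (p.2.length ≤ 1))).map (·.1)
  (List.zip ((-1) :: seps) seps).map
    (fun ab => (PySem.List.slice word_ents (some (ab.1 + 1)) (some ab.2)).flatMap pvNormalize)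

-- ===== PRECONDITION & SPEC =====
def Spec_create_seqs (word_ents : List (List String)) (out : List (List (List String))) : Prop := out = create_seqs_alt word_ents
instance (word_ents : List (List String)) (out : List (List (List String))) : Decidable (Spec_create_seqs word_ents out) := by unfold Spec_create_seqs; infer_instance

-- ===== CLAIM (what is proved, stated in full; the proofs are below) =====
def Claim_equal_create_seqs : Prop := ∀ (word_ents : List (List String)), Dom_create_seqs word_ents → Spec_create_seqs word_ents (create_seqs word_ents)

-- ===== LEMMAS AND PROOFS =====

-- A's flush-time filter predicate
def pvP (x : List String) : Bool := 0 < PySem.Str.len (PySem.List.pyGetD x 0 "")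

-- the items A appends for an in-group element (unfiltered)
def pvExpand (ents : List String) : List (List String) :=
  let e0 := PySem.List.pyGetD ents 0 ""
  if PySem.Str.len e0 = 0 then []
  else
    let e1 := PySem.List.pyGetD ents 1 ""
    (if PySem.Str.pyGet? e0 (-1) = some '.' then [[PySem.Str.slice e0 none (some (-1)), e1]] else []) ++
    [if 1 < PySem.Str.len e0 then [PySem.Str.replace e0 "," "", e1] else ents]

-- prepend xs to the head sequence, if any
def pvConsHead (xs : List (List String)) : List (List (List String)) → List (List (List String))
  | [] => []
  | h :: r => (xs ++ h) :: r

-- common recursive specification of both programs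
def pvBspec : List (List String) → List (List (List String))
  | [] => []
  | e :: t => if 1 < e.length then pvConsHead (pvNormalize e) (pvBspec t) else [] :: pvBspec t

-- A's remaining output given the pending buffer q
def pvSegsFrom (q : List (List String)) : List (List String) → List (List (List String))
  | [] => []
  | e :: t => if 1 < e.length then pvSegsFrom (q ++ pvExpand e) t else q.filter pvP :: pvSegsFrom [] t

-- B's output given a start index and the remaining separator positions
def pvGoA (l : List (List String)) (a : Int) : List Int → List (List (List String))
  | [] => []
  | s :: r => (PySem.List.slice l (some a) (some s)).flatMap pvNormalize :: pvGoA l (s + 1) r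

-- B's separator positions from start index s
def pvSepsP (l : List (List String)) (s : Int) : List Int :=
  ((PySem.List.enumerate l s).filter (fun p => decide (p.2.length ≤ 1))).map (·.1)

theorem pv_getLast?_iff_suffix (l : List Char) (c : Char) :
    l.getLast? = some c ↔ [c].isSuffixOf l = true := by
  rw [List.isSuffixOf_iff_suffix, List.getLast?_eq_some_iff]
  constructor
  · rintro ⟨ys, rfl⟩; exact ⟨ys, rfl⟩
  · rintro ⟨ys, rfl⟩; exact ⟨ys, rfl⟩

-- A's trailing-dot test coincides with B's endswith on any string
theorem pv_dot_cond (e0 : String) :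
    (PySem.Str.pyGet? e0 (-1) = some '.') ↔ PySem.Str.endswith e0 "." = true := by
  simp only [PySem.Str.pyGet?_eq, PySem.Chars.pyGet?_eq_listPyGet?, PySem.List.pyGet?_neg_one,
    PySem.Str.endswith_eq]
  show _ ↔ PySem.Chars.endswith e0.toList ".".toList = true
  simp only [PySem.Chars.endswith]
  exact pv_getLast?_iff_suffix e0.toList '.'

-- filtering A's appended items yields exactly B's normalize
theorem pv_expand_filter (e : List String) :
    (pvExpand e).filter pvP = pvNormalize e := by
  simp only [pvExpand, pvNormalize]
  set w := PySem.List.pyGetD e 0 "" with hw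
  set e1 := PySem.List.pyGetD e 1 "" with he1
  set r := PySem.Str.replace w "," "" with hr
  have hls : PySem.Str.len (PySem.Str.slice w none (some (-1)))
      = ((w.toList.length - 1 : Nat) : Int) := by
    rw [PySem.Str.len_eq, PySem.Str.slice_to_neg_one, List.length_dropLast]
  have hget2 : ∀ (a : String), PySem.List.pyGetD [a, e1] 0 "" = a := fun a => rfl
  have hfilter1 : ∀ (a : String), List.filter pvP [[a, e1]]
      = if 0 < PySem.Str.len a then [[a, e1]] else [] := by
    intro a
    rw [List.filter_cons]
    have hp : pvP [a, e1] = decide (0 < PySem.Str.len a) := rfl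
    rw [hp]
    by_cases hb : 0 < PySem.Str.len a
    · simp
    · simp
  have hPe : pvP e = decide (0 < PySem.Str.len w) := by simp [pvP, hw]
  by_cases h0 : PySem.Str.len w = 0
  · have hn : w.toList.length = 0 := by rw [PySem.Str.len_eq] at h0; exact_mod_cast h0
    rw [if_pos h0,
      if_neg (show ¬ (PySem.Str.endswith w "." = true ∧ 1 < PySem.Str.len w) by
        rintro ⟨-, h1⟩; rw [PySem.Str.len_eq, hn] at h1; norm_num at h1),
      if_neg (show ¬ (1 < PySem.Str.len w ∧ 0 < PySem.Str.len r) by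
        rintro ⟨h1, -⟩; rw [PySem.Str.len_eq, hn] at h1; norm_num at h1),
      if_neg (show ¬ PySem.Str.len w = 1 by rw [PySem.Str.len_eq, hn]; norm_num)]
    simp
  · have hn : 0 < w.toList.length := by rw [PySem.Str.len_eq] at h0; omega
    rw [if_neg h0, List.filter_append]
    by_cases h1 : 1 < PySem.Str.len w
    · have h1n : 1 < w.toList.length := by rw [PySem.Str.len_eq] at h1; omega
      rw [if_pos h1]
      have hdotfilter : List.filter pvP [[PySem.Str.slice w none (some (-1)), e1]]
          = [[PySem.Str.slice w none (some (-1)), e1]] := by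
        rw [hfilter1, if_pos (by rw [hls]; omega)]
      by_cases hdot : PySem.Str.pyGet? w (-1) = some '.'
      · have hend := (pv_dot_cond w).mp hdot
        rw [if_pos hdot, if_pos ⟨hend, h1⟩, hdotfilter]
        by_cases hrp : 0 < PySem.Str.len r
        · rw [if_pos ⟨h1, hrp⟩, hfilter1, if_pos hrp]
        · rw [if_neg (show ¬ (1 < PySem.Str.len w ∧ 0 < PySem.Str.len r) by
              rintro ⟨-, hh⟩; exact hrp hh), hfilter1, if_neg hrp,
            if_neg (show ¬ PySem.Str.len w = 1 by
              rw [PySem.Str.len_eq]; exact_mod_cast (by omega : ¬ ((w.toList.length : Int) = 1)))]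
      · have hend : ¬ (PySem.Str.endswith w "." = true ∧ 1 < PySem.Str.len w) :=
          fun hh => hdot ((pv_dot_cond w).mpr hh.1)
        rw [if_neg hdot, if_neg hend]
        by_cases hrp : 0 < PySem.Str.len r
        · rw [if_pos ⟨h1, hrp⟩, hfilter1, if_pos hrp]; simp
        · rw [if_neg (show ¬ (1 < PySem.Str.len w ∧ 0 < PySem.Str.len r) by
              rintro ⟨-, hh⟩; exact hrp hh), hfilter1, if_neg hrp,
            if_neg (show ¬ PySem.Str.len w = 1 by
              rw [PySem.Str.len_eq]; exact_mod_cast (by omega : ¬ ((w.toList.length : Int) = 1)))]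
          simp
    · have hn1 : w.toList.length = 1 := by rw [PySem.Str.len_eq] at h1; omega
      rw [if_neg h1,
        if_neg (show ¬ (PySem.Str.endswith w "." = true ∧ 1 < PySem.Str.len w) by
          rintro ⟨-, hh⟩; exact h1 hh),
        if_neg (show ¬ (1 < PySem.Str.len w ∧ 0 < PySem.Str.len r) by
          rintro ⟨hh, -⟩; exact h1 hh),
        if_pos (show PySem.Str.len w = 1 by rw [PySem.Str.len_eq, hn1]; norm_num)]
      have hefilter : List.filter pvP [e] = [e] := by
        simp [List.filter, hPe, PySem.Str.len_eq, hn1]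
      by_cases hdot : PySem.Str.pyGet? w (-1) = some '.'
      · rw [if_pos hdot, hfilter1,
          if_neg (show ¬ 0 < PySem.Str.len (PySem.Str.slice w none (some (-1))) by
            rw [hls, hn1]; norm_num), hefilter]
      · rw [if_neg hdot, hefilter]
        simp

-- one A-step on an in-group element appends exactly pvExpand ents
theorem pv_stepA_group (s : List (List (List String))) (q : List (List String))
    (ents : List String) (h : 1 < ents.length) :
    pvStepA (s, q) ents = (s, q ++ pvExpand ents) := by
  simp only [pvStepA, pvExpand, if_pos h]
  set e0 := PySem.List.pyGetD ents 0 "" with he0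
  by_cases h0 : e0 = ""
  · simp [h0]
  · have hpos : 0 < e0.length := by
      cases hn : e0.length with
      | zero => exact absurd ((String.length_eq_zero_iff.mp hn)) h0
      | succ n => omega
    by_cases hdot : PySem.Str.pyGet? e0 (-1) = some '.' <;>
    by_cases h1 : 1 < PySem.Str.len e0 <;>
      simp_all [PySem.Str.len_eq, String.length_toList] <;>
      split_ifs with hc <;> rfl

-- one A-step on a separator flushes the filtered buffer
theorem pv_stepA_sep (s : List (List (List String))) (q : List (List String))
    (ents : List String) (h : ¬ 1 < ents.length) :
    pvStepA (s, q) ents = (s ++ [q.filter pvP], []) := by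
  simp only [pvStepA, if_neg h]
  rfl

-- A's fold equals pvSegsFrom
theorem pv_foldA (l : List (List String)) :
    ∀ (s : List (List (List String))) (q : List (List String)),
      (l.foldl pvStepA (s, q)).1 = s ++ pvSegsFrom q l := by
  induction l with
  | nil => intro s q; simp [pvSegsFrom]
  | cons e t ih =>
    intro s q
    by_cases h : 1 < e.length
    · simp only [List.foldl_cons, pv_stepA_group s q e h, pvSegsFrom, if_pos h]
      exact ih s (q ++ pvExpand e)
    · rw [List.foldl_cons, pv_stepA_sep s q e h, ih]
      simp only [pvSegsFrom, if_neg h]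
      simp

-- pvConsHead composes
theorem pv_consHead_consHead (a b : List (List String)) (x : List (List (List String))) :
    pvConsHead a (pvConsHead b x) = pvConsHead (a ++ b) x := by
  cases x <;> simp [pvConsHead]

theorem pv_consHead_nil (x : List (List (List String))) : pvConsHead [] x = x := by
  cases x <;> simp [pvConsHead]

-- pvSegsFrom in terms of the common spec
theorem pv_segsFrom_eq (l : List (List String)) :
    ∀ q, pvSegsFrom q l = pvConsHead (q.filter pvP) (pvBspec l) := by
  induction l with
  | nil => intro q; simp [pvSegsFrom, pvBspec, pvConsHead]
  | cons e t ih =>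
    intro q
    by_cases h : 1 < e.length
    · simp only [pvSegsFrom, pvBspec, if_pos h]
      rw [ih (q ++ pvExpand e), List.filter_append, pv_expand_filter,
        ← pv_consHead_consHead]
    · simp only [pvSegsFrom, pvBspec, if_neg h]
      rw [ih [], List.filter_nil, pv_consHead_nil]
      simp [pvConsHead]

-- separator positions, structurally
theorem pv_sepsP_cons (e : List String) (t : List (List String)) (s : Int) :
    pvSepsP (e :: t) s =
      (if 1 < e.length then [] else [s]) ++ pvSepsP t (s + 1) := by
  by_cases h : 1 < e.length
  · have h' : ¬ (e.length ≤ 1) := by omega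
    simp [pvSepsP, PySem.List.enumerate_cons, h, h']
  · have h' : e.length ≤ 1 := by omega
    simp [pvSepsP, PySem.List.enumerate_cons, h, h']

theorem pv_sepsP_shift (l : List (List String)) :
    ∀ s : Int, pvSepsP l (s + 1) = (pvSepsP l s).map (· + 1) := by
  induction l with
  | nil => intro s; simp [pvSepsP, PySem.List.enumerate_nil]
  | cons e t ih =>
    intro s
    rw [pv_sepsP_cons, pv_sepsP_cons, ih (s + 1)]
    by_cases h : 1 < e.length <;> simp [h]

theorem pv_sepsP_nonneg (l : List (List String)) :
    ∀ s : Int, 0 ≤ s → ∀ x ∈ pvSepsP l s, 0 ≤ x := by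
  induction l with
  | nil => intro s _ x hx; simp [pvSepsP, PySem.List.enumerate_nil] at hx
  | cons e t ih =>
    intro s hs x hx
    rw [pv_sepsP_cons] at hx
    rcases List.mem_append.mp hx with hx | hx
    · by_cases h : 1 < e.length <;> simp [h] at hx; omega
    · exact ih (s + 1) (by omega) x hx

-- the zip of consecutive separator positions computes pvGoA
theorem pv_zip_goA (l : List (List String)) :
    ∀ (ss : List Int) (p : Int),
      (List.zip (p :: ss) ss).map
        (fun ab => (PySem.List.slice l (some (ab.1 + 1)) (some ab.2)).flatMap pvNormalize)
        = pvGoA l (p + 1) ss := by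
  intro ss
  induction ss with
  | nil => intro p; simp [pvGoA]
  | cons s r ih =>
    intro p
    rw [List.zip_cons_cons, List.map_cons, ih s]
    rfl

-- shifting pvGoA across a cons cell
theorem pv_goA_shift (e : List String) (t : List (List String)) :
    ∀ (ss : List Int) (a : Int), 0 ≤ a → (∀ x ∈ ss, 0 ≤ x) →
      pvGoA (e :: t) (a + 1) (ss.map (· + 1)) = pvGoA t a ss := by
  intro ss
  induction ss with
  | nil => intro a _ _; simp [pvGoA]
  | cons s r ih =>
    intro a ha hss
    have hs : 0 ≤ s := hss s (by simp)
    simp only [List.map_cons, pvGoA]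
    have hsl : PySem.List.slice (e :: t) (some (a + 1)) (some (s + 1))
        = PySem.List.slice t (some a) (some s) := by
      rw [PySem.List.slice_toNat (e :: t) (by omega) (by omega),
          PySem.List.slice_toNat t ha hs]
      have h2 : (s + 1).toNat - (a + 1).toNat = s.toNat - a.toNat := by omega
      rw [show (a + 1).toNat = a.toNat + 1 by omega] at h2 ⊢
      rw [h2, List.drop_succ_cons]
    rw [hsl]
    have := ih (s + 1) (by omega) (fun x hx => hss x (by simp [hx]))
    simpa using this

-- B's pvGoA form equals the common spec
theorem pv_goA_bspec (l : List (List String)) :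
    pvGoA l 0 (pvSepsP l 0) = pvBspec l := by
  induction l with
  | nil => simp [pvSepsP, PySem.List.enumerate_nil, pvGoA, pvBspec]
  | cons e t ih =>
    have hshift : pvSepsP t (0 + 1) = (pvSepsP t 0).map (· + 1) := pv_sepsP_shift t 0
    have hnn := pv_sepsP_nonneg t 0 le_rfl
    rw [pv_sepsP_cons]
    by_cases h : 1 < e.length
    · simp only [if_pos h, List.nil_append, hshift]
      cases hss : pvSepsP t 0 with
      | nil =>
        have hbt : pvBspec t = [] := by rw [← ih, hss]; rfl
        simp [pvGoA, pvBspec, h, hbt, pvConsHead]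
      | cons s r =>
        have hs : (0:Int) ≤ s := hnn s (by rw [hss]; simp)
        have hr : ∀ x ∈ r, (0:Int) ≤ x := fun x hx => hnn x (by rw [hss]; simp [hx])
        simp only [List.map_cons, pvGoA]
        have hsl : PySem.List.slice (e :: t) (some (0:Int)) (some (s + 1))
            = e :: PySem.List.slice t (some (0:Int)) (some s) := by
          rw [PySem.List.slice_toNat (e :: t) le_rfl (by omega),
              PySem.List.slice_toNat t le_rfl hs]
          have h1 : (s + 1).toNat = s.toNat + 1 := by omega
          simp [h1, List.take_succ_cons]
        have hgo : pvGoA (e :: t) (s + 1 + 1) (r.map (· + 1)) = pvGoA t (s + 1) r :=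
          pv_goA_shift e t r (s + 1) (by omega) hr
        rw [hsl, hgo, pvBspec, if_pos h, ← ih, hss]
        simp [pvGoA, pvConsHead]
    · simp only [if_neg h, List.cons_append, List.nil_append, hshift]
      have hz : PySem.List.slice (e :: t) (some ((0:Int))) (some (0:Int)) = [] := by
        rw [PySem.List.slice_toNat (e :: t) le_rfl le_rfl]; simp
      simp only [pvGoA, hz, List.flatMap_nil]
      have hgo : pvGoA (e :: t) ((0:Int) + 1) ((pvSepsP t 0).map (· + 1))
          = pvGoA t 0 (pvSepsP t 0) := pv_goA_shift e t _ 0 le_rfl hnn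
      rw [hgo, ih, pvBspec, if_neg h]

-- ===== VERDICT (by name: the statement is the Claim_ definition above) =====
theorem create_seqs_spec : Claim_equal_create_seqs := by
  intro word_ents _
  show create_seqs word_ents = create_seqs_alt word_ents
  rw [create_seqs, pv_foldA, pv_segsFrom_eq]
  show pvConsHead (List.filter pvP []) (pvBspec word_ents) = _
  rw [show List.filter pvP [] = [] from rfl, pv_consHead_nil]
  rw [create_seqs_alt]
  show pvBspec word_ents = (List.zip ((-1) :: pvSepsP word_ents 0) (pvSepsP word_ents 0)).map _
  rw [pv_zip_goA]
  norm_num [pv_goA_bspec]
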